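-- pv_equiv track=rewrite | github.com/victorcode27/Delivery-Manifest | delivery_manifest_backend/app/routes/delivery.py | _derive_manifest_status
-- ===== SOURCE A (Python) =====
-- def _derive_manifest_status(statuses: list) -> str:
--     """
--     Derive a manifest-level summary status from the list of per-invoice delivery statuses.
--
--     Rules (evaluated in order):
--       1. Empty list OR all PENDING                                 → PENDING
--       2. All DELIVERED or RETURNED                                 → COMPLETED
--       3. All resolved (no PENDING/IN_TRANSIT) + any FAILED/PARTIAL → COMPLETED_WITH_ISSUES
--       4. Anything else                                             → IN_PROGRESS
--     """
--     if not statuses or all(s == "PENDING" for s in statuses):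
--         return "PENDING"
--     if all(s in ("DELIVERED", "RETURNED") for s in statuses):
--         return "COMPLETED"
--     if all(s in ("DELIVERED", "RETURNED", "FAILED", "PARTIAL") for s in statuses):
--         return "COMPLETED_WITH_ISSUES"
--     return "IN_PROGRESS"
-- ===== SOURCE B (Python) =====
-- def _derive_manifest_status(statuses: list) -> str:
--     # One pass: classify each status into exactly one of four categories.
--     has_pending = has_done = has_issue = has_other = False
--     for s in statuses:
--         if s == "PENDING":
--             has_pending = True
--         elif s == "DELIVERED" or s == "RETURNED":
--             has_done = True
--         elif s == "FAILED" or s == "PARTIAL":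
--             has_issue = True
--         else:
--             has_other = True
--     if has_other or (has_pending and (has_done or has_issue)):
--         return "IN_PROGRESS"
--     if has_pending or not statuses:
--         return "PENDING"
--     if has_issue:
--         return "COMPLETED_WITH_ISSUES"
--     return "COMPLETED"
-- ===== Notes on version B (the rewrite author's own statement) =====
-- stated objective: alternative
-- what changed: Replaces A's three staged all() scans with a single pass that classifies each status into one of four mutually exclusive categories (pending/done/issue/other) as boolean flags, then decides the summary from a decision table on the flags.
import Mathlib
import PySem

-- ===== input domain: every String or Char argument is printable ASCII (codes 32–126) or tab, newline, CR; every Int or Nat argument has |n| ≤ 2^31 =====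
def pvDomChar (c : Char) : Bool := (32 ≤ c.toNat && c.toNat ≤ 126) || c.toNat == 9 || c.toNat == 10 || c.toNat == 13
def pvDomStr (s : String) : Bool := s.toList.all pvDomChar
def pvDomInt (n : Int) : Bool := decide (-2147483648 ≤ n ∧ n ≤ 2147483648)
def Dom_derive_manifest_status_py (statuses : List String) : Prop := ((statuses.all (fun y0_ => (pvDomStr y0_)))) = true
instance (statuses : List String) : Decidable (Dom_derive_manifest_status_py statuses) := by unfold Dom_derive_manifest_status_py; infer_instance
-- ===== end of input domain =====

-- B replaces A's three staged all() scans by one pass that classifies each status into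
-- four mutually exclusive boolean flags and decides from a decision table on the flags.


-- ===== PORT A =====
def derive_manifest_status_py (statuses : List String) : String :=
  if statuses.isEmpty || statuses.all (fun s => s == "PENDING") then "PENDING"
  else if statuses.all (fun s => s == "DELIVERED" || s == "RETURNED") then "COMPLETED"
  else if statuses.all (fun s => s == "DELIVERED" || s == "RETURNED" || s == "FAILED" || s == "PARTIAL") then "COMPLETED_WITH_ISSUES"
  else "IN_PROGRESS"

-- ===== PORT B =====
-- loop body of B: update the four flags (has_pending, has_done, has_issue, has_other)
def dmsStep (acc : Bool × Bool × Bool × Bool) (s : String) : Bool × Bool × Bool × Bool :=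
  if s == "PENDING" then (true, acc.2.1, acc.2.2.1, acc.2.2.2)
  else if s == "DELIVERED" || s == "RETURNED" then (acc.1, true, acc.2.2.1, acc.2.2.2)
  else if s == "FAILED" || s == "PARTIAL" then (acc.1, acc.2.1, true, acc.2.2.2)
  else (acc.1, acc.2.1, acc.2.2.1, true)

def derive_manifest_status_py_alt (statuses : List String) : String :=
  let f := statuses.foldl dmsStep (false, false, false, false)
  if f.2.2.2 || (f.1 && (f.2.1 || f.2.2.1)) then "IN_PROGRESS"
  else if f.1 || statuses.isEmpty then "PENDING"
  else if f.2.2.1 then "COMPLETED_WITH_ISSUES"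
  else "COMPLETED"

-- ===== PRECONDITION & SPEC =====
def Spec_derive_manifest_status_py (statuses : List String) (out : String) : Prop := out = derive_manifest_status_py_alt statuses
instance (statuses : List String) (out : String) : Decidable (Spec_derive_manifest_status_py statuses out) := by unfold Spec_derive_manifest_status_py; infer_instance

-- ===== CLAIM (what is proved, stated in full; the proofs are below) =====
def Claim_equal_derive_manifest_status_py : Prop := ∀ (statuses : List String), Dom_derive_manifest_status_py statuses → Spec_derive_manifest_status_py statuses (derive_manifest_status_py statuses)

-- ===== LEMMAS AND PROOFS =====

-- the four mutually exclusive, jointly exhaustive category predicates of B's classifier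
def pP (s : String) : Bool := s == "PENDING"
def pD (s : String) : Bool := s == "DELIVERED" || s == "RETURNED"
def pI (s : String) : Bool := s == "FAILED" || s == "PARTIAL"
def pO (s : String) : Bool := !pP s && !pD s && !pI s

-- one step of B's loop sets each flag to old-flag ∨ category-of-s
theorem dmsStep_char (acc : Bool × Bool × Bool × Bool) (s : String) :
    dmsStep acc s = (acc.1 || pP s, acc.2.1 || pD s, acc.2.2.1 || pI s, acc.2.2.2 || pO s) := by
  unfold dmsStep
  cases hP : (s == "PENDING") <;> cases hD : (s == "DELIVERED") <;> cases hR : (s == "RETURNED") <;>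
    cases hF : (s == "FAILED") <;> cases hPA : (s == "PARTIAL") <;>
    simp only [pP, pD, pI, pO, hP, hD, hR, hF, hPA] <;> simp_all

-- B's fold computes the four List.any's of the category predicates
theorem fold_char (xs : List String) (a b c d : Bool) :
    xs.foldl dmsStep (a, b, c, d) = (a || xs.any pP, b || xs.any pD, c || xs.any pI, d || xs.any pO) := by
  induction xs generalizing a b c d with
  | nil => simp
  | cons x xs ih =>
    rw [List.foldl_cons, dmsStep_char, ih]
    simp [Bool.or_assoc]

-- pointwise partition facts: the complement of each of A's all()-predicates is a union of categories
theorem not_pP (s : String) : (!(s == "PENDING")) = (pD s || pI s || pO s) := by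
  cases hP : (s == "PENDING") <;> cases hD : (s == "DELIVERED") <;> cases hR : (s == "RETURNED") <;>
    cases hF : (s == "FAILED") <;> cases hPA : (s == "PARTIAL") <;>
    simp only [pP, pD, pI, pO, hP, hD, hR, hF, hPA] <;> simp_all

theorem not_pD (s : String) : (!(s == "DELIVERED" || s == "RETURNED")) = (pP s || pI s || pO s) := by
  cases hP : (s == "PENDING") <;> cases hD : (s == "DELIVERED") <;> cases hR : (s == "RETURNED") <;>
    cases hF : (s == "FAILED") <;> cases hPA : (s == "PARTIAL") <;>
    simp only [pP, pD, pI, pO, hP, hD, hR, hF, hPA] <;> simp_all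

theorem not_pDI (s : String) : (!(pD s || pI s)) = (pP s || pO s) := by
  cases hP : (s == "PENDING") <;> cases hD : (s == "DELIVERED") <;> cases hR : (s == "RETURNED") <;>
    cases hF : (s == "FAILED") <;> cases hPA : (s == "PARTIAL") <;>
    simp only [pP, pD, pI, pO, hP, hD, hR, hF, hPA] <;> simp_all

-- an all() is the negation of the any() of the complement categories
-- any distributes over a pointwise disjunction
theorem any_or_split (l : List String) (p q : String → Bool) :
    (l.any fun s => p s || q s) = (l.any p || l.any q) := by
  induction l with
  | nil => rfl
  | cons x xs ih => simp [List.any_cons, ih, Bool.or_assoc, Bool.or_left_comm]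

-- an all() is the negation of the any() of the complement categories
theorem all_as_any (xs : List String) (p q : String → Bool) (h : ∀ s, (!p s) = q s) :
    xs.all p = !xs.any q := by
  rw [List.all_eq_not_any_not]
  exact congrArg _ (congrArg _ (funext h))

-- the categories are exhaustive, so a nonempty list has at least one flag set
theorem cover (x : String) (xs : List String) :
    ((x :: xs).any pP || (x :: xs).any pD || (x :: xs).any pI || (x :: xs).any pO) = true := by
  cases hp : pP x <;> cases hd : pD x <;> cases hi : pI x <;>
    simp [List.any_cons, pO, hp, hd, hi]

-- ===== VERDICT (by name: the statement is the Claim_ definition above) =====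
theorem derive_manifest_status_py_spec : Claim_equal_derive_manifest_status_py := by
  intro statuses _
  unfold Spec_derive_manifest_status_py derive_manifest_status_py derive_manifest_status_py_alt
  cases statuses with
  | nil => rfl
  | cons x xs =>
    rw [fold_char]
    simp only [Bool.false_or]
    have h1 : (x :: xs).all (fun s => s == "PENDING")
        = !((x :: xs).any pD || (x :: xs).any pI || (x :: xs).any pO) := by
      rw [all_as_any _ _ (fun s => pD s || pI s || pO s) (fun s => not_pP s),
        any_or_split _ (fun s => pD s || pI s) pO, any_or_split _ pD pI]
    have h2 : (x :: xs).all (fun s => s == "DELIVERED" || s == "RETURNED")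
        = !((x :: xs).any pP || (x :: xs).any pI || (x :: xs).any pO) := by
      rw [all_as_any _ _ (fun s => pP s || pI s || pO s) (fun s => not_pD s),
        any_or_split _ (fun s => pP s || pI s) pO, any_or_split _ pP pI]
    have h3 : (x :: xs).all (fun s => s == "DELIVERED" || s == "RETURNED" || s == "FAILED" || s == "PARTIAL")
        = !((x :: xs).any pP || (x :: xs).any pO) := by
      have hpt : ∀ s : String,
          (!(s == "DELIVERED" || s == "RETURNED" || s == "FAILED" || s == "PARTIAL"))
          = (pP s || pO s) := by
        intro s
        rw [← not_pDI s]
        simp [pD, pI, Bool.or_assoc]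
      rw [all_as_any _ _ (fun s => pP s || pO s) hpt, any_or_split _ pP pO]
    have hcov := cover x xs
    rw [h1, h2, h3]
    simp only [List.isEmpty_cons]
    revert hcov
    cases (x :: xs).any pP <;> cases (x :: xs).any pD <;>
      cases (x :: xs).any pI <;> cases (x :: xs).any pO <;> simp
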